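-- pv_equiv track=rewrite | github.com/mcpe500/quantum-algo-visualizer | backend/api/qaoa.py | compute_exact_maxcut
-- ===== SOURCE A (Python) =====
-- def compute_exact_maxcut(n_nodes, edges):
--     """
--     Brute-force Max-Cut: enumerate all 2^n_nodes bit assignments.
--
--     Returns (max_cut: int, best_partition: list[int]).
--     """
--     max_cut = 0
--     best_partition = [0] * n_nodes
--
--     for mask in range(1 << n_nodes):
--         bits = [(mask >> i) & 1 for i in range(n_nodes)]
--         cut = sum(1 for (qi, qj) in edges if bits[qi] != bits[qj])
--         if cut > max_cut:
--             max_cut = cut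
--             best_partition = bits[:]
--
--     return int(max_cut), [int(b) for b in best_partition]
-- ===== SOURCE B (Python) =====
-- def compute_exact_maxcut(n_nodes, edges):
--     """
--     Exact Max-Cut by incremental enumeration: walk masks 0..2^n-1 in order,
--     flip only the bits that change, and adjust the running cut by re-scoring
--     just the edges incident to each flipped bit (remove old contribution,
--     flip, add new contribution).
--
--     Returns (max_cut: int, best_partition: list[int]).
--     """
--     inc = [[] for _ in range(n_nodes)]
--     for e in edges:
--         u, v = e
--         inc[u].append(e)
--         inc[v].append(e)
--
--     bits = [0] * n_nodes
--     cut = 0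
--     best_cut = 0
--     best = bits[:]
--     mask = 0
--     for step in range(1, 1 << n_nodes):
--         flips = mask ^ step
--         mask = step
--         j = 0
--         while flips:
--             if flips & 1:
--                 for (u, v) in inc[j]:
--                     if bits[u] != bits[v]:
--                         cut -= 1
--                 bits[j] ^= 1
--                 for (u, v) in inc[j]:
--                     if bits[u] != bits[v]:
--                         cut += 1
--             flips >>= 1
--             j += 1
--         if cut > best_cut:
--             best_cut = cut
--             best = bits[:]
--     return best_cut, best
-- ===== Notes on version B (the rewrite author's own statement) =====
-- stated objective: alternative
-- what changed: Instead of rebuilding the full bit list and recounting every edge for each of the 2^n masks, B keeps a live bit list and running cut, precomputes per-node incident-edge lists once, and on each mask step re-scores only the edges incident to the flipped bits (remove old contribution, flip, add new), copying the bit list only when a new best is found.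
import Mathlib
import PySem

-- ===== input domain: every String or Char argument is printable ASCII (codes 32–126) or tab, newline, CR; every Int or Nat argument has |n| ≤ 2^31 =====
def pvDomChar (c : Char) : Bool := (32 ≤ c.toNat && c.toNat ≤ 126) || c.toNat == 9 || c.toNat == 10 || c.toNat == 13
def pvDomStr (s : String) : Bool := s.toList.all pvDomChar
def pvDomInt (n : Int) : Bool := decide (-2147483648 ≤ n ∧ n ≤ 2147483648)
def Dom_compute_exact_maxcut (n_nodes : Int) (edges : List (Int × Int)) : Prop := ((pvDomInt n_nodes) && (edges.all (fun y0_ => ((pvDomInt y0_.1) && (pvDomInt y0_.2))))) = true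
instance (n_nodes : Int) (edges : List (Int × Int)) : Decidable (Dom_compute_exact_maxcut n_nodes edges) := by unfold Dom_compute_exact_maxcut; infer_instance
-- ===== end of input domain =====

-- B replaces A's per-mask rebuild-and-recount by incremental enumeration: a live bit
-- list and running cut, adjusted per flipped bit by re-scoring only the incident edges
-- (remove old contribution, flip, add new); neither version mutates its arguments.

-- ===== PORT A =====
def compute_exact_maxcut (n_nodes : Int) (edges : List (Int × Int)) : Int × List Int :=
  let n := n_nodes.toNat
  let r := (List.range (2 ^ n)).foldl (fun (acc : Int × List Int) mask =>
      let bits : List Int := (List.range n).map (fun i => (((mask >>> i) &&& 1 : Nat) : Int))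
      let cut : Int := (edges.countP (fun e =>
          PySem.List.pyGet? bits e.1 != PySem.List.pyGet? bits e.2) : Nat)
      if cut > acc.1 then (cut, bits) else acc)
    ((0 : Int), List.replicate n (0 : Int))
  (r.1, r.2.map (fun b => b))

-- ===== PORT B =====
-- rows[i].append(x): hand port of Python list indexing/mutation; exact for in-range
-- (incl. negative) indices; out of range Python raises IndexError (excluded by Pre_).
def pvAppendAt {α : Type} (rows : List (List α)) (i : Int) (x : α) : List (List α) :=
  let k : Int := if i < 0 then i + rows.length else i
  if 0 ≤ k ∧ k < rows.length then rows.set k.toNat ((rows.getD k.toNat []) ++ [x]) else rows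

def pvBuildInc (n_nodes : Int) (edges : List (Int × Int)) : List (List (Int × Int)) :=
  edges.foldl (fun inc e => pvAppendAt (pvAppendAt inc e.1 e) e.2 e)
    (List.replicate n_nodes.toNat [])

-- the inner `while flips:` loop of B
def pvFlipLoop (inc : List (List (Int × Int))) (flips j : Nat) (bits : List Int) (cut : Int) :
    List Int × Int :=
  if h : flips = 0 then (bits, cut)
  else
    let p : List Int × Int :=
      if flips % 2 = 1 then
        let cut1 := (inc.getD j []).foldl (fun c e =>
          if PySem.List.pyGet? bits e.1 != PySem.List.pyGet? bits e.2 then c - 1 else c) cut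
        -- bits[j] ^= 1 : in-place update at nonneg index j
        let bits' := bits.set j (Int.xor (bits.getD j 0) 1)
        let cut2 := (inc.getD j []).foldl (fun c e =>
          if PySem.List.pyGet? bits' e.1 != PySem.List.pyGet? bits' e.2 then c + 1 else c) cut1
        (bits', cut2)
      else (bits, cut)
    pvFlipLoop inc (flips >>> 1) (j + 1) p.1 p.2
termination_by flips
decreasing_by simpa [Nat.shiftRight_one] using Nat.div_lt_self (Nat.pos_of_ne_zero h) one_lt_two

def compute_exact_maxcut_alt (n_nodes : Int) (edges : List (Int × Int)) : Int × List Int :=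
  let n := n_nodes.toNat
  let inc := pvBuildInc n_nodes edges
  -- state (best_cut, best, bits, cut, mask)
  let s := (List.range' 1 (2 ^ n - 1)).foldl
      (fun (st : Int × List Int × List Int × Int × Nat) step =>
        let bc := pvFlipLoop inc (st.2.2.2.2 ^^^ step) 0 st.2.2.1 st.2.2.2.1
        if bc.2 > st.1 then (bc.2, bc.1, bc.1, bc.2, step) else (st.1, st.2.1, bc.1, bc.2, step))
      ((0 : Int), List.replicate n (0 : Int), List.replicate n (0 : Int), (0 : Int), (0 : Nat))
  (s.1, s.2.1)

-- ===== PRECONDITION & SPEC =====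
-- Pre_: exactly where Python A returns: n_nodes ≥ 0 (else `1 << n_nodes` raises ValueError)
-- and every edge endpoint a valid (possibly negative) Python index into the n_nodes bits
-- (else bits[qi] raises IndexError).
def Pre_compute_exact_maxcut (n_nodes : Int) (edges : List (Int × Int)) : Prop :=
  0 ≤ n_nodes ∧ ∀ e ∈ edges,
    (-n_nodes ≤ e.1 ∧ e.1 < n_nodes) ∧ (-n_nodes ≤ e.2 ∧ e.2 < n_nodes)
instance (n_nodes : Int) (edges : List (Int × Int)) : Decidable (Pre_compute_exact_maxcut n_nodes edges) := by unfold Pre_compute_exact_maxcut; infer_instance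

def pvWitness_compute_exact_maxcut : Int × (List (Int × Int)) := (3, [(0, 1), (1, 2), (0, 2)])

def Spec_compute_exact_maxcut (n_nodes : Int) (edges : List (Int × Int)) (out : Int × List Int) : Prop := out = compute_exact_maxcut_alt n_nodes edges
instance (n_nodes : Int) (edges : List (Int × Int)) (out : Int × List Int) : Decidable (Spec_compute_exact_maxcut n_nodes edges out) := by unfold Spec_compute_exact_maxcut; infer_instance

-- ===== CLAIM (what is proved, stated in full; the proofs are below) =====
def Claim_equal_compute_exact_maxcut : Prop := ∀ (n_nodes : Int) (edges : List (Int × Int)), Dom_compute_exact_maxcut n_nodes edges → Pre_compute_exact_maxcut n_nodes edges → Spec_compute_exact_maxcut n_nodes edges (compute_exact_maxcut n_nodes edges)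

-- ===== LEMMAS AND PROOFS =====

-- index into the bit vector after Python's negative-index wrap
def pvWrap (n_nodes : Int) (q : Int) : Nat := (q % n_nodes).toNat
-- 0/1 contribution of one edge to the cut of mask m
def pvInd (n_nodes : Int) (m : Nat) (e : Int × Int) : Int :=
  if m.testBit (pvWrap n_nodes e.1) != m.testBit (pvWrap n_nodes e.2) then 1 else 0
def pvCnt (n_nodes : Int) (E : List (Int × Int)) (m : Nat) : Int :=
  (E.map (pvInd n_nodes m)).sum
-- occurrences of an edge in incidence row j (once per endpoint resolving to cell j)
def pvRowE (n_nodes : Int) (j : Nat) (e : Int × Int) : List (Int × Int) :=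
  (if pvWrap n_nodes e.1 = j then [e] else []) ++ (if pvWrap n_nodes e.2 = j then [e] else [])
-- the bit list A builds for mask m
def pvBits (n m : Nat) : List Int := (List.range n).map (fun i => (((m >>> i) &&& 1 : Nat) : Int))

theorem pvBit_mod (m i : Nat) : m.testBit i = ((m >>> i) % 2 == 1) := by
  rw [Nat.testBit, Nat.one_and_eq_mod_two]
  rcases Nat.mod_two_eq_zero_or_one (m >>> i) with h2 | h2 <;> simp [h2]

theorem pvBitVal (m i : Nat) : (((m >>> i) &&& 1 : Nat) : Int) = if m.testBit i then 1 else 0 := by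
  rw [Nat.and_one_is_mod, pvBit_mod]
  rcases Nat.mod_two_eq_zero_or_one (m >>> i) with h2 | h2 <;> simp [h2]

theorem pvTestBit_flip (m j i : Nat) :
    (m ^^^ (1 <<< j)).testBit i = if i = j then !(m.testBit i) else m.testBit i := by
  rw [Nat.testBit_xor, Nat.shiftLeft_eq, one_mul, Nat.testBit_two_pow]
  by_cases h : i = j
  · simp [h, Bool.xor_comm]
  · simp [h, show ¬ j = i from fun hh => h hh.symm]

theorem pvShiftSplit (flips j m : Nat) :
    m ^^^ (flips <<< j)
      = (m ^^^ ((flips % 2) <<< j)) ^^^ ((flips / 2) <<< (j + 1)) := by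
  rw [Nat.xor_assoc]
  congr 1
  apply Nat.eq_of_testBit_eq
  intro p
  simp only [Nat.testBit_xor, Nat.testBit_shiftLeft]
  rcases Nat.lt_trichotomy p j with h | h | h
  · simp [Nat.not_le.mpr h, show ¬ (j+1 ≤ p) by omega]
  · subst h
    simp [show ¬ (p+1 ≤ p) by omega]
  · have h2 : j + 1 ≤ p := h
    have h3 : (flips / 2).testBit (p - (j+1)) = flips.testBit (p - j) := by
      rw [Nat.testBit_div_two, show p - (j+1) + 1 = p - j by omega]
    have h4 : (flips % 2).testBit (p - j) = false :=
      Nat.testBit_eq_false_of_lt (lt_of_lt_of_le (Nat.mod_lt _ two_pos)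
        (by simpa using Nat.pow_le_pow_right (by omega) (show 1 ≤ p - j by omega)))
    simp [le_of_lt h, h2, h3, h4]

theorem pvEmod_eq (n_nodes q : Int) (h1 : -n_nodes ≤ q) (h2 : q < n_nodes) :
    q % n_nodes = if q < 0 then q + n_nodes else q := by
  split_ifs with h
  · rw [← Int.add_emod_right, Int.emod_eq_of_lt (by omega) (by omega)]
  · exact Int.emod_eq_of_lt (by omega) h2

theorem pvWrap_lt (n_nodes q : Int) (h1 : -n_nodes ≤ q) (h2 : q < n_nodes) :
    pvWrap n_nodes q < n_nodes.toNat := by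
  unfold pvWrap
  rw [pvEmod_eq n_nodes q h1 h2]
  split_ifs with h <;> omega

theorem pvBits_get (n_nodes : Int) (m : Nat) (q : Int)
    (h1 : -n_nodes ≤ q) (h2 : q < n_nodes) :
    PySem.List.pyGet? (pvBits n_nodes.toNat m) q
      = some (if m.testBit (pvWrap n_nodes q) then 1 else 0) := by
  have hlen : (pvBits n_nodes.toNat m).length = n_nodes.toNat := by simp [pvBits]
  have hw := pvWrap_lt n_nodes q h1 h2
  have hwv : (pvWrap n_nodes q : Int) = if q < 0 then q + n_nodes else q := by
    unfold pvWrap; rw [pvEmod_eq n_nodes q h1 h2]; split_ifs <;> omega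
  have hget : (pvBits n_nodes.toNat m)[pvWrap n_nodes q]? = some (if m.testBit (pvWrap n_nodes q) then 1 else 0) := by
    rw [List.getElem?_eq_getElem (by omega)]
    congr 1
    have he : (pvBits n_nodes.toNat m)[pvWrap n_nodes q]'(by omega)
        = (((m >>> (pvWrap n_nodes q)) &&& 1 : Nat) : Int) := by
      simp [pvBits]
    rw [he, pvBitVal]
  by_cases hq : q < 0
  · have hwq : (pvWrap n_nodes q : Int) = q + n_nodes := by rw [hwv]; simp [hq]
    have hk1 : 0 < (-q).toNat := by omega
    have hk2 : (-q).toNat ≤ (pvBits n_nodes.toNat m).length := by omega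
    have hrw : PySem.List.pyGet? (pvBits n_nodes.toNat m) q
        = (pvBits n_nodes.toNat m)[(pvBits n_nodes.toNat m).length - (-q).toNat]? := by
      conv_lhs => rw [show q = -(((-q).toNat : Nat) : Int) by omega]
      exact PySem.List.pyGet?_neg_natCast _ _ hk1 hk2
    rw [hrw, hlen, show n_nodes.toNat - (-q).toNat = pvWrap n_nodes q by omega]
    exact hget
  · have hwq : (pvWrap n_nodes q : Int) = q := by rw [hwv]; simp [hq]
    rw [PySem.List.pyGet?_of_nonneg (pvBits n_nodes.toNat m) (show (0:Int) ≤ q by omega),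
        show q.toNat = pvWrap n_nodes q by omega]
    exact hget

theorem pvCutA (n_nodes : Int) (edges : List (Int × Int)) (m : Nat)
    (hE : ∀ e ∈ edges, (-n_nodes ≤ e.1 ∧ e.1 < n_nodes) ∧ (-n_nodes ≤ e.2 ∧ e.2 < n_nodes)) :
    ((edges.countP (fun e =>
        PySem.List.pyGet? (pvBits n_nodes.toNat m) e.1
          != PySem.List.pyGet? (pvBits n_nodes.toNat m) e.2) : Nat) : Int)
      = pvCnt n_nodes edges m := by
  unfold pvCnt
  induction edges with
  | nil => simp
  | cons e es ih =>
    have he := hE e (by simp)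
    have hes : ∀ e' ∈ es, (-n_nodes ≤ e'.1 ∧ e'.1 < n_nodes) ∧ (-n_nodes ≤ e'.2 ∧ e'.2 < n_nodes) :=
      fun e' h' => hE e' (by simp [h'])
    rw [List.countP_cons, List.map_cons, List.sum_cons]
    push_cast
    rw [ih hes]
    have h1 := pvBits_get n_nodes m e.1 he.1.1 he.1.2
    have h2 := pvBits_get n_nodes m e.2 he.2.1 he.2.2
    unfold pvInd
    rw [h1, h2]
    by_cases hb : m.testBit (pvWrap n_nodes e.1) = m.testBit (pvWrap n_nodes e.2)
    · simp [hb]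
    · rcases Bool.eq_false_or_eq_true (m.testBit (pvWrap n_nodes e.1)) with hx | hx <;>
        rcases Bool.eq_false_or_eq_true (m.testBit (pvWrap n_nodes e.2)) with hy | hy <;>
        simp [hx, hy] at hb ⊢ <;> ring

theorem pvAppendAt_length {α : Type} (rows : List (List α)) (i : Int) (x : α) :
    (pvAppendAt rows i x).length = rows.length := by
  unfold pvAppendAt
  dsimp only
  split <;> split <;> simp

theorem pvAppendAt_getD {α : Type} (n_nodes' : Int) (rows : List (List α)) (q : Int) (x : α)
    (j : Nat)
    (hlen : (rows.length : Int) = n_nodes') (h1 : -n_nodes' ≤ q) (h2 : q < n_nodes') :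
    (pvAppendAt rows q x).getD j []
      = if pvWrap n_nodes' q = j then (rows.getD j []) ++ [x] else rows.getD j [] := by
  have hwv : (pvWrap n_nodes' q : Int) = if q < 0 then q + n_nodes' else q := by
    unfold pvWrap; rw [pvEmod_eq n_nodes' q h1 h2]; split_ifs <;> omega
  have hw : pvWrap n_nodes' q < rows.length := by split_ifs at hwv <;> omega
  unfold pvAppendAt
  have hk : (if q < 0 then q + (rows.length : Int) else q) = (pvWrap n_nodes' q : Int) := by
    rw [hwv, hlen]
  simp only [hk]
  rw [if_pos ⟨by omega, by exact_mod_cast hw⟩]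
  have htn : ((pvWrap n_nodes' q : Int)).toNat = pvWrap n_nodes' q := by omega
  rw [htn]
  by_cases hj : pvWrap n_nodes' q = j
  · subst hj
    rw [if_pos rfl, List.getD, List.getD]
    rw [List.getElem?_set_self (by omega)]
    simp [List.getElem?_eq_getElem hw]
  · rw [if_neg hj, List.getD, List.getD, List.getElem?_set_ne hj]
    rfl

theorem pvBits_zero (n : Nat) : pvBits n 0 = List.replicate n 0 := by
  unfold pvBits
  rw [List.eq_replicate_iff]
  constructor
  · simp
  · intro b hb
    simp only [List.mem_map] at hb
    obtain ⟨i, _, hi⟩ := hb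
    simp [Nat.zero_shiftRight] at hi
    omega

theorem pvCnt_zero (n_nodes : Int) (edges : List (Int × Int)) :
    pvCnt n_nodes edges 0 = 0 := by
  unfold pvCnt pvInd
  induction edges with
  | nil => simp
  | cons e es ih => simp

theorem pvInc_fold (n_nodes : Int) (j : Nat) (edges : List (Int × Int))
    (hE : ∀ e ∈ edges, (-n_nodes ≤ e.1 ∧ e.1 < n_nodes) ∧ (-n_nodes ≤ e.2 ∧ e.2 < n_nodes)) :
    ∀ inc0 : List (List (Int × Int)), (inc0.length : Int) = n_nodes →
    (edges.foldl (fun inc e => pvAppendAt (pvAppendAt inc e.1 e) e.2 e) inc0).getD j []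
      = inc0.getD j [] ++ edges.flatMap (pvRowE n_nodes j) := by
  induction edges with
  | nil => intro inc0 _; simp
  | cons e es ih =>
    intro inc0 hlen
    have he := hE e (by simp)
    have hes : ∀ e' ∈ es, (-n_nodes ≤ e'.1 ∧ e'.1 < n_nodes) ∧ (-n_nodes ≤ e'.2 ∧ e'.2 < n_nodes) :=
      fun e' h' => hE e' (by simp [h'])
    rw [List.foldl_cons, List.flatMap_cons]
    have hlen1 : ((pvAppendAt inc0 e.1 e).length : Int) = n_nodes := by
      rw [pvAppendAt_length]; exact hlen
    have hlen2 : ((pvAppendAt (pvAppendAt inc0 e.1 e) e.2 e).length : Int) = n_nodes := by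
      rw [pvAppendAt_length]; exact hlen1
    rw [ih hes _ hlen2]
    rw [pvAppendAt_getD n_nodes _ e.2 _ j hlen1 he.2.1 he.2.2]
    rw [pvAppendAt_getD n_nodes _ e.1 _ j hlen he.1.1 he.1.2]
    unfold pvRowE
    by_cases h1 : pvWrap n_nodes e.1 = j <;> by_cases h2 : pvWrap n_nodes e.2 = j <;>
      simp [h1, h2]

theorem pvInc_row (n_nodes : Int) (edges : List (Int × Int)) (j : Nat) (hn : 0 ≤ n_nodes)
    (hE : ∀ e ∈ edges, (-n_nodes ≤ e.1 ∧ e.1 < n_nodes) ∧ (-n_nodes ≤ e.2 ∧ e.2 < n_nodes)) :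
    (pvBuildInc n_nodes edges).getD j [] = edges.flatMap (pvRowE n_nodes j) := by
  unfold pvBuildInc
  rw [pvInc_fold n_nodes j edges hE (List.replicate n_nodes.toNat []) (by simp; omega)]
  rcases Nat.lt_or_ge j n_nodes.toNat with h | h
  · simp [List.getD, List.getElem?_eq_getElem
      (show j < (List.replicate n_nodes.toNat ([] : List (Int × Int))).length by
        simp only [List.length_replicate]; exact h)]
  · simp [List.getD, List.getElem?_eq_none_iff.mpr
      (show (List.replicate n_nodes.toNat ([] : List (Int × Int))).length ≤ j by
        simp only [List.length_replicate]; exact h)]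

-- the set of bits list = bit list of the flipped mask
theorem pvBits_set (n m j : Nat) (hj : j < n) :
    (pvBits n m).set j (Int.xor ((pvBits n m).getD j 0) 1) = pvBits n (m ^^^ (1 <<< j)) := by
  have hlen : (pvBits n m).length = n := by simp [pvBits]
  have hget : ∀ (m' : Nat) (i : Nat) (h : i < n),
      (pvBits n m')[i]'(by simp [pvBits]; omega) = if m'.testBit i then 1 else 0 := by
    intro m' i h
    have : (pvBits n m')[i]'(by simp [pvBits]; omega) = (((m' >>> i) &&& 1 : Nat) : Int) := by
      simp [pvBits]
    rw [this, pvBitVal]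
  have hv : Int.xor ((pvBits n m).getD j 0) 1 = if (m ^^^ (1 <<< j)).testBit j then 1 else 0 := by
    have hgd : (pvBits n m).getD j 0 = if m.testBit j then 1 else 0 := by
      rw [List.getD, List.getElem?_eq_getElem (by omega)]
      simp only [Option.getD_some]
      exact hget m j hj
    rw [hgd, pvTestBit_flip m j j, if_pos rfl]
    rcases Bool.eq_false_or_eq_true (m.testBit j) with hb | hb <;> rw [hb] <;> decide
  apply List.ext_getElem
  · simp [pvBits]
  · intro i h1 h2
    have hi : i < n := by simpa [pvBits] using h2
    rw [List.getElem_set (by omega), hget (m ^^^ (1 <<< j)) i hi]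
    by_cases hij : j = i
    · subst hij
      rw [if_pos rfl, hv]
    · rw [if_neg hij, hget m i hi, pvTestBit_flip m j i]
      simp [show ¬ i = j from fun hh => hij hh.symm]

-- flip step: new cut = old cut − (old contributions of row j) + (new contributions of row j)
theorem pvCnt_flip (n_nodes : Int) (edges : List (Int × Int)) (m j : Nat)
    (hE : ∀ e ∈ edges, (-n_nodes ≤ e.1 ∧ e.1 < n_nodes) ∧ (-n_nodes ≤ e.2 ∧ e.2 < n_nodes)) :
    pvCnt n_nodes edges (m ^^^ (1 <<< j))
      = pvCnt n_nodes edges m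
        - ((edges.flatMap (pvRowE n_nodes j)).map (pvInd n_nodes m)).sum
        + ((edges.flatMap (pvRowE n_nodes j)).map (pvInd n_nodes (m ^^^ (1 <<< j)))).sum := by
  unfold pvCnt
  induction edges with
  | nil => simp
  | cons e es ih =>
    have he := hE e (by simp)
    have hes : ∀ e' ∈ es, (-n_nodes ≤ e'.1 ∧ e'.1 < n_nodes) ∧ (-n_nodes ≤ e'.2 ∧ e'.2 < n_nodes) :=
      fun e' h' => hE e' (by simp [h'])
    rw [List.flatMap_cons, List.map_append, List.sum_append, List.map_append, List.sum_append,
      List.map_cons, List.map_cons, List.sum_cons, List.sum_cons]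
    have hih := ih hes
    set m' := m ^^^ (1 <<< j) with hm'
    -- per-edge identity for the head edge
    have hhead : pvInd n_nodes m' e
        = pvInd n_nodes m e - ((pvRowE n_nodes j e).map (pvInd n_nodes m)).sum
          + ((pvRowE n_nodes j e).map (pvInd n_nodes m')).sum := by
      unfold pvRowE
      by_cases h1 : pvWrap n_nodes e.1 = j <;> by_cases h2 : pvWrap n_nodes e.2 = j
      · -- both endpoints resolve to cell j: contribution is 0 before and after
        have hz : pvInd n_nodes m e = 0 := by
          unfold pvInd; rw [h1, h2]; simp
        have hz' : pvInd n_nodes m' e = 0 := by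
          unfold pvInd; rw [h1, h2]; simp
        simp [h1, h2, hz, hz']
      · simp only [if_pos h1, if_neg h2, List.append_nil, List.map_cons, List.map_nil,
          List.sum_cons, List.sum_nil]
        ring
      · simp only [if_neg h1, if_pos h2, List.nil_append, List.map_cons, List.map_nil,
          List.sum_cons, List.sum_nil]
        ring
      · -- neither endpoint is in cell j: contribution unchanged
        have heq : pvInd n_nodes m' e = pvInd n_nodes m e := by
          unfold pvInd
          rw [hm', pvTestBit_flip m j (pvWrap n_nodes e.1), if_neg h1,
            pvTestBit_flip m j (pvWrap n_nodes e.2), if_neg h2]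
        simp [h1, h2, heq]
    rw [hih, hhead]
    ring

-- a fold that subtracts/adds 1 per crossing edge = running cut minus/plus the row's contributions
theorem pvFoldDelta (n_nodes : Int) (m : Nat) (d cut : Int) (l : List (Int × Int))
    (hl : ∀ e ∈ l, (-n_nodes ≤ e.1 ∧ e.1 < n_nodes) ∧ (-n_nodes ≤ e.2 ∧ e.2 < n_nodes)) :
    l.foldl (fun c e =>
        if PySem.List.pyGet? (pvBits n_nodes.toNat m) e.1
            != PySem.List.pyGet? (pvBits n_nodes.toNat m) e.2 then c + d else c) cut
      = cut + d * (l.map (pvInd n_nodes m)).sum := by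
  induction l generalizing cut with
  | nil => simp
  | cons e es ih =>
    have he := hl e (by simp)
    have hes : ∀ e' ∈ es, (-n_nodes ≤ e'.1 ∧ e'.1 < n_nodes) ∧ (-n_nodes ≤ e'.2 ∧ e'.2 < n_nodes) :=
      fun e' h' => hl e' (by simp [h'])
    rw [List.foldl_cons, List.map_cons, List.sum_cons]
    have h1 := pvBits_get n_nodes m e.1 he.1.1 he.1.2
    have h2 := pvBits_get n_nodes m e.2 he.2.1 he.2.2
    have hind : pvInd n_nodes m e
        = if PySem.List.pyGet? (pvBits n_nodes.toNat m) e.1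
            != PySem.List.pyGet? (pvBits n_nodes.toNat m) e.2 then 1 else 0 := by
      unfold pvInd
      rw [h1, h2]
      by_cases hb : m.testBit (pvWrap n_nodes e.1) = m.testBit (pvWrap n_nodes e.2)
      · simp [hb]
      · rcases Bool.eq_false_or_eq_true (m.testBit (pvWrap n_nodes e.1)) with hx | hx <;>
          rcases Bool.eq_false_or_eq_true (m.testBit (pvWrap n_nodes e.2)) with hy | hy <;>
          simp [hx, hy] at hb ⊢
    by_cases hc : (PySem.List.pyGet? (pvBits n_nodes.toNat m) e.1
        != PySem.List.pyGet? (pvBits n_nodes.toNat m) e.2) = true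
    · rw [if_pos hc, ih _ hes]
      rw [hind, if_pos hc]
      ring
    · rw [if_neg hc, ih _ hes]
      rw [hind, if_neg hc]
      ring

theorem pvFlipLoop_spec (n_nodes : Int) (edges : List (Int × Int))
    (hE : ∀ e ∈ edges, (-n_nodes ≤ e.1 ∧ e.1 < n_nodes) ∧ (-n_nodes ≤ e.2 ∧ e.2 < n_nodes))
    (hn : 0 ≤ n_nodes) :
    ∀ (flips j m : Nat), m < 2 ^ n_nodes.toNat → m ^^^ (flips <<< j) < 2 ^ n_nodes.toNat →
    pvFlipLoop (pvBuildInc n_nodes edges) flips j (pvBits n_nodes.toNat m)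
        (pvCnt n_nodes edges m)
      = (pvBits n_nodes.toNat (m ^^^ (flips <<< j)), pvCnt n_nodes edges (m ^^^ (flips <<< j))) := by
  intro flips
  induction flips using Nat.strong_induction_on with
  | _ flips ih =>
    intro j m hm htar
    rw [pvFlipLoop]
    by_cases h0 : flips = 0
    · simp [h0]
    · rw [dif_neg h0]
      have hlt : flips >>> 1 < flips := by
        simpa [Nat.shiftRight_one] using Nat.div_lt_self (Nat.pos_of_ne_zero h0) one_lt_two
      have hsplit := pvShiftSplit flips j m
      have hrowmem : ∀ e ∈ edges.flatMap (pvRowE n_nodes j),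
          (-n_nodes ≤ e.1 ∧ e.1 < n_nodes) ∧ (-n_nodes ≤ e.2 ∧ e.2 < n_nodes) := by
        intro e hmem
        rw [List.mem_flatMap] at hmem
        obtain ⟨e0, he0, hin⟩ := hmem
        have : e = e0 := by
          unfold pvRowE at hin
          rcases List.mem_append.mp hin with h | h <;> split_ifs at h <;>
            simp at h <;> exact h
        rw [this]; exact hE e0 he0
      by_cases hpar : flips % 2 = 1
      · simp only [if_pos hpar]
        -- the flipped bit j lies below n
        have hj : j < n_nodes.toNat := by
          by_contra hge
          have h2jn : 2 ^ n_nodes.toNat ≤ 2 ^ j :=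
            Nat.pow_le_pow_right (by omega) (by omega)
          have hbm : m.testBit j = false := Nat.testBit_eq_false_of_lt (by omega)
          have hbt : (m ^^^ (flips <<< j)).testBit j = false :=
            Nat.testBit_eq_false_of_lt (by omega)
          rw [Nat.testBit_xor, hbm, Nat.testBit_shiftLeft] at hbt
          simp [pvBit_mod, hpar] at hbt
        set m' := m ^^^ (1 <<< j) with hm'def
        have hm' : m' < 2 ^ n_nodes.toNat := by
          apply Nat.xor_lt_two_pow hm
          calc 1 <<< j = 2 ^ j := by rw [Nat.shiftLeft_eq, one_mul]
            _ < 2 ^ n_nodes.toNat := Nat.pow_lt_pow_right (by omega) hj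
        have hrow := pvInc_row n_nodes edges j hn hE
        have hf1 := pvFoldDelta n_nodes m (-1) (pvCnt n_nodes edges m)
          (edges.flatMap (pvRowE n_nodes j)) hrowmem
        have hf2 := pvFoldDelta n_nodes m' 1
          (pvCnt n_nodes edges m - ((edges.flatMap (pvRowE n_nodes j)).map (pvInd n_nodes m)).sum)
          (edges.flatMap (pvRowE n_nodes j)) hrowmem
        have hsetbits := pvBits_set n_nodes.toNat m j hj
        simp only [hrow]
        have hfold1 : (edges.flatMap (pvRowE n_nodes j)).foldl (fun c e =>
            if PySem.List.pyGet? (pvBits n_nodes.toNat m) e.1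
                != PySem.List.pyGet? (pvBits n_nodes.toNat m) e.2 then c - 1 else c)
            (pvCnt n_nodes edges m)
            = pvCnt n_nodes edges m - ((edges.flatMap (pvRowE n_nodes j)).map (pvInd n_nodes m)).sum := by
          have hfeq : (fun (c : Int) (e : Int × Int) =>
              if PySem.List.pyGet? (pvBits n_nodes.toNat m) e.1
                  != PySem.List.pyGet? (pvBits n_nodes.toNat m) e.2 then c - 1 else c)
              = (fun (c : Int) (e : Int × Int) =>
              if PySem.List.pyGet? (pvBits n_nodes.toNat m) e.1
                  != PySem.List.pyGet? (pvBits n_nodes.toNat m) e.2 then c + (-1) else c) := by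
            funext c e; split_ifs <;> ring
          rw [hfeq, hf1]; ring
        rw [hfold1, hsetbits, ← hm'def]
        rw [hf2]
        have hcnt : pvCnt n_nodes edges m
            - ((edges.flatMap (pvRowE n_nodes j)).map (pvInd n_nodes m)).sum
            + 1 * ((edges.flatMap (pvRowE n_nodes j)).map (pvInd n_nodes m')).sum
            = pvCnt n_nodes edges m' := by
          rw [hm'def, pvCnt_flip n_nodes edges m j hE]; ring
        rw [hcnt]
        rw [ih (flips >>> 1) hlt (j + 1) m' hm'
          (by rw [Nat.shiftRight_one, hm'def,
                show (1:Nat) <<< j = (flips % 2) <<< j by rw [hpar], ← hsplit]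
              exact htar)]
        rw [Nat.shiftRight_one, hm'def]
        have : (m ^^^ (1 <<< j)) ^^^ (flips / 2) <<< (j + 1) = m ^^^ flips <<< j := by
          rw [hsplit, hpar]
        rw [this]
      · have hpar0 : flips % 2 = 0 := by omega
        simp only [if_neg hpar]
        rw [ih (flips >>> 1) hlt (j + 1) m hm
          (by rw [Nat.shiftRight_one]
              have h2 : m ^^^ flips <<< j = m ^^^ (flips / 2) <<< (j + 1) := by
                rw [hsplit, hpar0]; simp
              rw [← h2]; exact htar)]
        rw [Nat.shiftRight_one]
        conv_rhs => rw [hsplit, hpar0]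
        simp

theorem pvMainFold (n_nodes : Int) (edges : List (Int × Int)) (hn : 0 ≤ n_nodes)
    (hE : ∀ e ∈ edges, (-n_nodes ≤ e.1 ∧ e.1 < n_nodes) ∧ (-n_nodes ≤ e.2 ∧ e.2 < n_nodes))
    (l : List Nat) (hl : ∀ s ∈ l, s < 2 ^ n_nodes.toNat) :
    ∀ (a : Int × List Int) (b : Int × List Int × List Int × Int × Nat),
    a.1 = b.1 → a.2 = b.2.1 → b.2.2.1 = pvBits n_nodes.toNat b.2.2.2.2 →
    b.2.2.2.1 = pvCnt n_nodes edges b.2.2.2.2 → b.2.2.2.2 < 2 ^ n_nodes.toNat →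
    (l.foldl (fun (acc : Int × List Int) mask =>
        let bits : List Int := (List.range n_nodes.toNat).map
          (fun i => (((mask >>> i) &&& 1 : Nat) : Int))
        let cut : Int := (edges.countP (fun e =>
            PySem.List.pyGet? bits e.1 != PySem.List.pyGet? bits e.2) : Nat)
        if cut > acc.1 then (cut, bits) else acc) a).1
      = (l.foldl (fun (st : Int × List Int × List Int × Int × Nat) step =>
          let bc := pvFlipLoop (pvBuildInc n_nodes edges) (st.2.2.2.2 ^^^ step) 0 st.2.2.1 st.2.2.2.1
          if bc.2 > st.1 then (bc.2, bc.1, bc.1, bc.2, step) else (st.1, st.2.1, bc.1, bc.2, step)) b).1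
    ∧ (l.foldl (fun (acc : Int × List Int) mask =>
        let bits : List Int := (List.range n_nodes.toNat).map
          (fun i => (((mask >>> i) &&& 1 : Nat) : Int))
        let cut : Int := (edges.countP (fun e =>
            PySem.List.pyGet? bits e.1 != PySem.List.pyGet? bits e.2) : Nat)
        if cut > acc.1 then (cut, bits) else acc) a).2
      = (l.foldl (fun (st : Int × List Int × List Int × Int × Nat) step =>
          let bc := pvFlipLoop (pvBuildInc n_nodes edges) (st.2.2.2.2 ^^^ step) 0 st.2.2.1 st.2.2.2.1
          if bc.2 > st.1 then (bc.2, bc.1, bc.1, bc.2, step) else (st.1, st.2.1, bc.1, bc.2, step)) b).2.1 := by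
  induction l with
  | nil => intro a b h1 h2 _ _ _; exact ⟨h1, h2⟩
  | cons s l ihl =>
    intro a b h1 h2 h3 h4 h5
    have hs : s < 2 ^ n_nodes.toNat := hl s (by simp)
    have hl' : ∀ s' ∈ l, s' < 2 ^ n_nodes.toNat := fun s' h' => hl s' (by simp [h'])
    rw [List.foldl_cons, List.foldl_cons]
    have hbc : pvFlipLoop (pvBuildInc n_nodes edges) (b.2.2.2.2 ^^^ s) 0 b.2.2.1 b.2.2.2.1
        = (pvBits n_nodes.toNat s, pvCnt n_nodes edges s) := by
      rw [h3, h4]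
      have := pvFlipLoop_spec n_nodes edges hE hn (b.2.2.2.2 ^^^ s) 0 b.2.2.2.2 h5
        (by rw [Nat.shiftLeft_zero, ← Nat.xor_assoc, Nat.xor_self, Nat.zero_xor]; exact hs)
      rw [this]
      rw [Nat.shiftLeft_zero, ← Nat.xor_assoc, Nat.xor_self, Nat.zero_xor]
    have hcut : ((edges.countP (fun e =>
        PySem.List.pyGet? ((List.range n_nodes.toNat).map
          (fun i => (((s >>> i) &&& 1 : Nat) : Int))) e.1
          != PySem.List.pyGet? ((List.range n_nodes.toNat).map
          (fun i => (((s >>> i) &&& 1 : Nat) : Int))) e.2) : Nat) : Int)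
        = pvCnt n_nodes edges s := pvCutA n_nodes edges s hE
    dsimp only
    rw [hbc, hcut, h1]
    by_cases hgt : pvCnt n_nodes edges s > b.1
    · rw [if_pos hgt, if_pos hgt]
      exact ihl hl' _ _ rfl (by simp [pvBits]) rfl rfl hs
    · rw [if_neg hgt, if_neg hgt]
      exact ihl hl' _ _ h1 h2 rfl rfl hs

theorem pvEquiv (n_nodes : Int) (edges : List (Int × Int))
    (hpre : Pre_compute_exact_maxcut n_nodes edges) :
    compute_exact_maxcut n_nodes edges = compute_exact_maxcut_alt n_nodes edges := by
  obtain ⟨hn, hE⟩ := hpre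
  unfold compute_exact_maxcut compute_exact_maxcut_alt
  dsimp only
  have hpow : 2 ^ n_nodes.toNat = (2 ^ n_nodes.toNat - 1) + 1 := by
    have := Nat.one_le_two_pow (n := n_nodes.toNat); omega
  have hrange : List.range (2 ^ n_nodes.toNat)
      = 0 :: List.range' 1 (2 ^ n_nodes.toNat - 1) := by
    rw [List.range_eq_range', hpow, List.range'_succ]
    simp
  rw [hrange, List.foldl_cons]
  have h0 : ((edges.countP (fun e =>
      PySem.List.pyGet? ((List.range n_nodes.toNat).map
        (fun i => ((((0:Nat) >>> i) &&& 1 : Nat) : Int))) e.1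
        != PySem.List.pyGet? ((List.range n_nodes.toNat).map
        (fun i => ((((0:Nat) >>> i) &&& 1 : Nat) : Int))) e.2) : Nat) : Int)
      = pvCnt n_nodes edges 0 := pvCutA n_nodes edges 0 hE
  dsimp only
  rw [h0, pvCnt_zero]
  rw [if_neg (by omega)]
  have hl : ∀ s ∈ List.range' 1 (2 ^ n_nodes.toNat - 1), s < 2 ^ n_nodes.toNat := by
    intro s hs
    rw [List.mem_range'_1] at hs
    omega
  have key := pvMainFold n_nodes edges hn hE (List.range' 1 (2 ^ n_nodes.toNat - 1)) hl
      ((0 : Int), List.replicate n_nodes.toNat (0 : Int))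
      ((0:Int), List.replicate n_nodes.toNat (0:Int), List.replicate n_nodes.toNat (0:Int), (0:Int), (0:Nat))
      rfl rfl (by rw [pvBits_zero]) (by rw [pvCnt_zero]) (Nat.one_le_two_pow)
  refine Prod.ext ?_ ?_
  · simpa using key.1
  · simp only [List.map_id']
    simpa using key.2

-- ===== VERDICT (by name: the statement is the Claim_ definition above) =====
theorem compute_exact_maxcut_spec : Claim_equal_compute_exact_maxcut := by
  intro n_nodes edges _ hpre
  unfold Spec_compute_exact_maxcut
  exact pvEquiv n_nodes edges hpre
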